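-- pv_equiv track=rewrite | github.com/yukazakiri/iNiR | scripts/niri-config.py | _has_top_level_flag
-- ===== SOURCE A (Python) =====
-- def _has_top_level_flag(block_content, flag_name):
--     depth = 0
--     for raw_line in block_content.splitlines():
--         stripped = raw_line.strip()
--         if depth == 0 and stripped == flag_name:
--             return True
--         depth += raw_line.count("{") - raw_line.count("}")
--     return False
-- ===== SOURCE B (Python) =====
-- def _has_top_level_flag(block_content, flag_name):
--     # Recursive-descent style: the outer scan only ever looks at top-level lines;
--     # whenever a line opens a (possibly negative) brace imbalance, an inner loop
--     # skips the whole nested block before the outer scan resumes.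
--     lines = block_content.splitlines()
--     i, n = 0, len(lines)
--     while i < n:
--         line = lines[i]
--         if line.strip() == flag_name:
--             return True
--         d = line.count("{") - line.count("}")
--         i += 1
--         while d != 0 and i < n:
--             d += lines[i].count("{") - lines[i].count("}")
--             i += 1
--     return False
-- ===== Notes on version B (the rewrite author's own statement) =====
-- stated objective: alternative
-- what changed: Replaces A's flat single loop with a running depth counter by a nested two-level scan: an outer loop that only visits top-level lines and checks them against the flag, and an inner block-skipping loop that consumes an entire nested (brace-imbalanced) block before the outer scan resumes; no global depth variable is kept.
import Mathlib
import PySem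

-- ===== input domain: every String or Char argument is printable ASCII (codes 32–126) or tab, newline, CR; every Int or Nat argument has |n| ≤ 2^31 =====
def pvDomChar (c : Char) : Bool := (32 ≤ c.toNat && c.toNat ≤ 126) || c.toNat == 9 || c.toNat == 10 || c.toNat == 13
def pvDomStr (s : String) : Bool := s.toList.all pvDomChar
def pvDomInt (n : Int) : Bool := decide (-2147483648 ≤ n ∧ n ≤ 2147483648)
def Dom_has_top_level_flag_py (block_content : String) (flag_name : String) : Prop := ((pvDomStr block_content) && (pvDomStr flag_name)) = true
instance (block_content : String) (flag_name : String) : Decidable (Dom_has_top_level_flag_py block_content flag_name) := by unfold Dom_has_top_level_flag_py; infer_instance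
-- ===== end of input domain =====

-- B replaces A's flat loop with a global depth counter by a nested two-level scan: an
-- outer scan over top-level lines only, with an inner loop that skips a whole nested
-- brace-imbalanced block before the outer scan resumes.  Objective: alternative.

-- ===== PORT A =====
-- A's for-loop with early return, as structural recursion over the remaining lines
-- carrying the running depth.
def hasTopLevelFlagLoop (flag_name : String) (depth : Int) : List String → Bool
  | [] => false
  | raw_line :: rest =>
    let stripped := PySem.Str.strip raw_line
    if depth == 0 && stripped == flag_name then true
    else hasTopLevelFlagLoop flag_name
      (depth + ((PySem.Str.count raw_line "{" : Int) - (PySem.Str.count raw_line "}" : Int))) rest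

def has_top_level_flag_py (block_content : String) (flag_name : String) : Bool :=
  hasTopLevelFlagLoop flag_name 0 (PySem.Str.splitlines block_content)

-- ===== PORT B =====
-- brace imbalance of one line
def pvDelta (line : String) : Int :=
  (PySem.Str.count line "{" : Int) - (PySem.Str.count line "}" : Int)

-- B's inner while loop: consume lines until the block's brace imbalance d returns to 0
-- (or the lines run out); returns the remaining suffix of lines.
def pvSkipBlock (d : Int) : List String → List String
  | [] => []
  | l :: rest => if d == 0 then l :: rest else pvSkipBlock (d + pvDelta l) rest

theorem pvSkipBlock_length_le (d : Int) (lines : List String) :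
    (pvSkipBlock d lines).length ≤ lines.length := by
  induction lines generalizing d with
  | nil => simp [pvSkipBlock]
  | cons l rest ih =>
    simp only [pvSkipBlock]
    split
    · simp
    · exact le_trans (ih _) (Nat.le_succ _)

-- B's outer while loop: only ever sees top-level lines.
def pvOuterScan (flag_name : String) : List String → Bool
  | [] => false
  | line :: rest =>
    if PySem.Str.strip line == flag_name then true
    else pvOuterScan flag_name (pvSkipBlock (pvDelta line) rest)
termination_by lines => lines.length
decreasing_by
  exact Nat.lt_succ_of_le (pvSkipBlock_length_le _ _)

def has_top_level_flag_py_alt (block_content : String) (flag_name : String) : Bool :=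
  pvOuterScan flag_name (PySem.Str.splitlines block_content)

-- ===== PRECONDITION & SPEC =====
def Spec_has_top_level_flag_py (block_content : String) (flag_name : String) (out : Bool) : Prop := out = has_top_level_flag_py_alt block_content flag_name
instance (block_content : String) (flag_name : String) (out : Bool) : Decidable (Spec_has_top_level_flag_py block_content flag_name out) := by unfold Spec_has_top_level_flag_py; infer_instance

-- ===== CLAIM (what is proved, stated in full; the proofs are below) =====
def Claim_equal_has_top_level_flag_py : Prop := ∀ (block_content : String) (flag_name : String), Dom_has_top_level_flag_py block_content flag_name → Spec_has_top_level_flag_py block_content flag_name (has_top_level_flag_py block_content flag_name)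

-- ===== LEMMAS AND PROOFS =====
-- A's loop at depth d behaves like B's outer scan applied after skipping the current
-- block imbalance d (skipping nothing when d = 0).
theorem loop_eq_outer_skip (flag_name : String) (lines : List String) (d : Int) :
    hasTopLevelFlagLoop flag_name d lines = pvOuterScan flag_name (pvSkipBlock d lines) := by
  induction lines generalizing d with
  | nil => simp [hasTopLevelFlagLoop, pvSkipBlock, pvOuterScan]
  | cons l rest ih =>
    by_cases hd : d = 0
    · subst hd
      rw [pvSkipBlock]
      simp only [BEq.rfl, if_true]
      rw [pvOuterScan, hasTopLevelFlagLoop]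
      by_cases hs : PySem.Str.strip l == flag_name
      · simp [hs]
      · simp only [hs, Bool.and_false, if_neg, Bool.false_eq_true, not_false_eq_true,
          if_false]
        rw [ih]
        simp [pvDelta]
    · have hdb : (d == 0) = false := by simpa using hd
      rw [hasTopLevelFlagLoop]
      simp only [hdb, Bool.false_and, Bool.false_eq_true, if_false]
      rw [pvSkipBlock]
      simp only [hdb, Bool.false_eq_true, if_false]
      rw [ih]
      simp [pvDelta]

-- skipping with imbalance 0 skips nothing
theorem pvSkipBlock_zero (lines : List String) : pvSkipBlock 0 lines = lines := by
  cases lines <;> simp [pvSkipBlock]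

-- ===== VERDICT (by name: the statement is the Claim_ definition above) =====
theorem has_top_level_flag_py_spec : Claim_equal_has_top_level_flag_py := by
  intro block_content flag_name _
  unfold Spec_has_top_level_flag_py has_top_level_flag_py has_top_level_flag_py_alt
  rw [loop_eq_outer_skip, pvSkipBlock_zero]
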